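-- pv_equiv track=rewrite | github.com/ariannamethod/sska | subjectivity.py | build_bigrams
-- ===== SOURCE A (Python) =====
-- from typing import Dict, List, Tuple, Optional
--
-- def build_bigrams(tokens: List[str]) -> Tuple[Dict[str, Dict[str, int]], List[str]]:
--     """Build bigram graph from token list."""
--     bigrams: Dict[str, Dict[str, int]] = {}
--     vocab: Dict[str, None] = {}
--
--     for a, b in zip(tokens, tokens[1:]):
--         vocab[a] = None
--         vocab[b] = None
--         row = bigrams.setdefault(a, {})
--         row[b] = row.get(b, 0) + 1
--
--     return bigrams, list(vocab.keys())
-- ===== SOURCE B (Python) =====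
-- from typing import Dict, List, Tuple
--
-- def build_bigrams(tokens: List[str]) -> Tuple[Dict[str, Dict[str, int]], List[str]]:
--     """Build bigram graph by grouping successor lists per head, then counting whole lists."""
--     pairs = list(zip(tokens, tokens[1:]))
--     groups: Dict[str, List[str]] = {}
--     for a, b in pairs:
--         groups.setdefault(a, []).append(b)
--     bigrams: Dict[str, Dict[str, int]] = {}
--     for a, succs in groups.items():
--         row: Dict[str, int] = {}
--         for b in succs:
--             if b not in row:
--                 row[b] = succs.count(b)
--         bigrams[a] = row
--     vocab = []
--     for a, b in pairs:
--         if a not in vocab: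
--             vocab.append(a)
--         if b not in vocab:
--             vocab.append(b)
--     return bigrams, vocab
-- ===== Notes on version B (the rewrite author's own statement) =====
-- stated objective: alternative
-- what changed: Replaces A's single incremental pass (per-pair nested dict counter updates) with a staged group-then-count pipeline: first group successor lists per head token, then fill each row by first-occurrence dedup with whole-list counts, with vocab built in a separate pass.
import Mathlib
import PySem

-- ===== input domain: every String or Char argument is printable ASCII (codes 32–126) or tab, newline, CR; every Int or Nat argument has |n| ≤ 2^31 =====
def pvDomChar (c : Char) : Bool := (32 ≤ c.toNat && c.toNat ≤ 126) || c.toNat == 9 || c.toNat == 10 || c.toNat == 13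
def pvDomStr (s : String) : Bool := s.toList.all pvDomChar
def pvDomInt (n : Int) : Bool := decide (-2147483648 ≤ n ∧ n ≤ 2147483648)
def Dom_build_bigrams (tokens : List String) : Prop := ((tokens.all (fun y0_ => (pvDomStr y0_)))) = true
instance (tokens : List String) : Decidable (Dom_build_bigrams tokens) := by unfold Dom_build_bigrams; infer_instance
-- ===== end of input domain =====

-- B replaces A's single incremental pass by a staged group-then-count pipeline: successor lists
-- grouped per head first, then each row filled by first-occurrence dedup with whole-list counts,
-- vocab in its own pass.

-- ===== PORT A =====
-- literal port of A: one fold over zip(tokens, tokens[1:]) maintaining (bigrams, vocab)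
def build_bigrams (tokens : List String) : (List (String × List (String × Int))) × List String :=
  let st :=
    (tokens.zip (PySem.List.slice tokens (some 1) none)).foldl
      (fun (st : PySem.Dict String (PySem.Dict String Int) × PySem.Dict String (Option Unit)) ab =>
        let vocab := (st.2.insert ab.1 none).insert ab.2 none
        let bg := st.1.setdefault ab.1 PySem.Dict.empty
        let row := bg.getD ab.1 PySem.Dict.empty
        (bg.insert ab.1 (row.insert ab.2 (row.getD ab.2 0 + 1)), vocab))
      (PySem.Dict.empty, PySem.Dict.empty)
  (st.1.items.map (fun kr => (kr.1, kr.2.items)), st.2.keys)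

-- ===== PORT B =====
-- literal port of B: group successor lists per head (setdefault+append), then per head a row
-- filled first-occurrence with succs.count(b); vocab by its own first-occurrence pass
def build_bigrams_alt (tokens : List String) : (List (String × List (String × Int))) × List String :=
  let pairs := tokens.zip (PySem.List.slice tokens (some 1) none)
  let groups :=
    pairs.foldl
      (fun (g : PySem.Dict String (List String)) p =>
        let g1 := g.setdefault p.1 []
        g1.insert p.1 (g1.getD p.1 [] ++ [p.2]))
      PySem.Dict.empty
  let bigrams :=
    groups.items.foldl
      (fun (bg : PySem.Dict String (PySem.Dict String Int)) asucc =>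
        let succs := asucc.2
        let row :=
          succs.foldl
            (fun (r : PySem.Dict String Int) b =>
              if r.contains b then r else r.insert b ((succs.count b : Int)))
            PySem.Dict.empty
        bg.insert asucc.1 row)
      PySem.Dict.empty
  let vocab := pairs.foldl (fun (vs : PySem.Set String) p => PySem.Set.add (PySem.Set.add vs p.1) p.2) PySem.Set.empty
  (bigrams.items.map (fun kr => (kr.1, kr.2.items)), vocab)

-- ===== PRECONDITION & SPEC =====
def Spec_build_bigrams (tokens : List String) (out : (List (String × List (String × Int))) × List String) : Prop := out = build_bigrams_alt tokens
instance (tokens : List String) (out : (List (String × List (String × Int))) × List String) : Decidable (Spec_build_bigrams tokens out) := by unfold Spec_build_bigrams; infer_instance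

-- ===== CLAIM (what is proved, stated in full; the proofs are below) =====
def Claim_equal_build_bigrams : Prop := ∀ (tokens : List String), Dom_build_bigrams tokens → Spec_build_bigrams tokens (build_bigrams tokens)

-- ===== LEMMAS AND PROOFS =====

theorem pv_contains_ofList {α : Type} [BEq α] [LawfulBEq α] (xs : List α) (x : α) :
    (PySem.Set.ofList xs).contains x = decide (x ∈ xs) := by
  simp [PySem.Set.contains, PySem.Set.mem_ofList]

theorem pv_dedup_append {α : Type} [BEq α] [LawfulBEq α] (xs : List α) (x : α) :
    PySem.Set.ofList (xs ++ [x]) =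
      if x ∈ xs then PySem.Set.ofList xs else PySem.Set.ofList xs ++ [x] := by
  simp only [PySem.Set.ofList, List.foldl_append, List.foldl_cons,
    List.foldl_nil, PySem.Set.add]
  rw [show List.foldl PySem.Set.add PySem.Set.empty xs = PySem.Set.ofList xs from rfl,
    pv_contains_ofList]
  by_cases h : x ∈ xs <;> simp [h]

theorem pv_ofList_self {α : Type} [BEq α] [LawfulBEq α] (xs : List α) (h : xs.Nodup) :
    PySem.Set.ofList xs = xs := by
  induction xs using List.reverseRecOn with
  | nil => rfl
  | append_singleton xs x ih =>
    rcases List.nodup_append.1 h with ⟨h1, -, hdisj⟩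
    have hx : x ∉ xs := fun hm => by simpa using hdisj _ hm
    rw [pv_dedup_append, if_neg hx, ih h1]

theorem pv_dedup_map_dedup {α β : Type} [BEq α] [LawfulBEq α] [BEq β] [LawfulBEq β]
    (f : α → β) (xs : List α) :
    PySem.Set.ofList ((PySem.Set.ofList xs).map f) = PySem.Set.ofList (xs.map f) := by
  induction xs using List.reverseRecOn with
  | nil => rfl
  | append_singleton xs x ih =>
    rw [pv_dedup_append, List.map_append]
    by_cases h : x ∈ xs
    · have : f x ∈ xs.map f := List.mem_map_of_mem h
      simp [pv_dedup_append, h, this, ih]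
    · simp only [h, if_false, List.map_append, List.map_cons, List.map_nil]
      rw [pv_dedup_append, pv_dedup_append, ih]
      by_cases hf : f x ∈ xs.map f
      · have : f x ∈ (PySem.Set.ofList xs).map f := by
          simpa [PySem.Set.mem_ofList] using hf
        simp [hf, this]
      · have : ¬ f x ∈ (PySem.Set.ofList xs).map f := by
          simpa [PySem.Set.mem_ofList] using hf
        simp [hf, this]

def pvRow (ps : List (String × String)) (a : String) : List (String × Int) :=
  (PySem.Set.ofList (ps.filter (fun p => p.1 == a))).map (fun p => (p.2, (ps.count p : Int)))

theorem pvRow_ne (ps : List (String × String)) (p : String × String) (a' : String)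
    (h : p.1 ≠ a') : pvRow (ps ++ [p]) a' = pvRow ps a' := by
  unfold pvRow
  rw [List.filter_append]
  have : List.filter (fun q => q.1 == a') [p] = [] := by simp [h]
  rw [this, List.append_nil]
  refine List.map_congr_left ?_
  intro q hq
  have hq1 : q.1 = a' := by
    have := (List.mem_filter.1 ((PySem.Set.mem_ofList _ q).1 hq)).2
    simpa using this
  have hqp : q ≠ p := fun e => h (by rw [← e, hq1])
  simp [List.count_append, Ne.symm hqp]

theorem pvRow_fresh (ps : List (String × String)) (p : String × String)
    (h : p ∉ ps) : pvRow (ps ++ [p]) p.1 = pvRow ps p.1 ++ [(p.2, (ps.count p : Int) + 1)] := by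
  unfold pvRow
  rw [List.filter_append]
  have hfp : List.filter (fun q => q.1 == p.1) [p] = [p] := by simp
  rw [hfp, pv_dedup_append]
  have hnf : p ∉ List.filter (fun q => q.1 == p.1) ps := fun hx => h (List.mem_filter.1 hx).1
  rw [if_neg hnf, List.map_append]
  congr 1
  · refine List.map_congr_left ?_
    intro q hq
    have hqp : q ≠ p := by
      intro e; subst e
      exact h (List.mem_filter.1 ((PySem.Set.mem_ofList _ q).1 hq)).1
    simp [List.count_append, Ne.symm hqp]
  · simp [List.count_append]

theorem pvRow_dup (ps : List (String × String)) (p : String × String)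
    (h : p ∈ ps) : pvRow (ps ++ [p]) p.1 =
      (pvRow ps p.1).map
        (fun e => if e.1 == p.2 then (p.2, (ps.count p : Int) + 1) else e) := by
  unfold pvRow
  rw [List.filter_append]
  have hfp : List.filter (fun q => q.1 == p.1) [p] = [p] := by simp
  have hmf : p ∈ List.filter (fun q => q.1 == p.1) ps := List.mem_filter.2 ⟨h, by simp⟩
  rw [hfp, pv_dedup_append, if_pos hmf, List.map_map]
  refine List.map_congr_left ?_
  intro q hq
  have hq1 : q.1 = p.1 := by
    have := (List.mem_filter.1 ((PySem.Set.mem_ofList _ q).1 hq)).2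
    simpa using this
  by_cases hb : q.2 = p.2
  · have hqp : q = p := Prod.ext hq1 hb
    subst hqp
    simp [List.count_append]
  · have hqp : q ≠ p := fun e => hb (by rw [e])
    simp [Function.comp, hb, Ne.symm hqp, List.count_append]

def pvStepA (bg : PySem.Dict String (PySem.Dict String Int)) (ab : String × String) :
    PySem.Dict String (PySem.Dict String Int) :=
  let bg1 := bg.setdefault ab.1 PySem.Dict.empty
  let row := bg1.getD ab.1 PySem.Dict.empty
  bg1.insert ab.1 (row.insert ab.2 (row.getD ab.2 0 + 1))

def pvBG (ps : List (String × String)) : List (String × PySem.Dict String Int) :=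
  (PySem.Set.ofList (ps.map Prod.fst)).map (fun a => (a, PySem.Dict.mk (pvRow ps a)))

theorem pv_nodup_map_snd (a : String) (l : List (String × String)) (h1 : ∀ q ∈ l, q.1 = a)
    (h2 : l.Nodup) : (l.map Prod.snd).Nodup := by
  refine h2.map_on ?_
  intro x hx y hy hxy
  exact Prod.ext (by rw [h1 x hx, h1 y hy]) hxy

theorem pvBG_map_fst_append (ps : List (String × String)) (p : String × String) :
    PySem.Set.ofList ((ps ++ [p]).map Prod.fst) =
      if p.1 ∈ ps.map Prod.fst then PySem.Set.ofList (ps.map Prod.fst)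
      else PySem.Set.ofList (ps.map Prod.fst) ++ [p.1] := by
  rw [List.map_append, List.map_singleton, pv_dedup_append]

theorem pvA_step (ps : List (String × String)) (p : String × String)
    (d : PySem.Dict String (PySem.Dict String Int)) (ih : d.items = pvBG ps) :
    (pvStepA d p).items = pvBG (ps ++ [p]) := by
  have hkeys : d.keys = PySem.Set.ofList (ps.map Prod.fst) := by
    show d.items.map Prod.fst = _
    rw [ih]; unfold pvBG; rw [List.map_map]; exact List.map_id _
  have hnodk : d.keys.Nodup := by rw [hkeys]; exact PySem.Set.nodup_ofList _
  have hcont : d.contains p.1 = decide (p.1 ∈ ps.map Prod.fst) := by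
    rw [PySem.Dict.contains_eq_decide_mem_keys, hkeys]
    simp [PySem.Set.mem_ofList]
  by_cases hmem : p.1 ∈ ps.map Prod.fst
  · -- outer key already present
    have hc : d.contains p.1 = true := by rw [hcont]; exact decide_eq_true hmem
    have hrow : d.getD p.1 PySem.Dict.empty = PySem.Dict.mk (pvRow ps p.1) := by
      refine PySem.Dict.getD_of_mem_items d ?_ hnodk _
      rw [ih]; unfold pvBG
      exact List.mem_map_of_mem ((PySem.Set.mem_ofList _ _).2 hmem)
    have hrnodup : (PySem.Dict.mk (pvRow ps p.1)).keys.Nodup := by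
      have : ((pvRow ps p.1).map Prod.fst).Nodup := by
        unfold pvRow
        rw [List.map_map]
        have : (Prod.fst ∘ fun p : String × String => ((p.2 : String), (ps.count p : Int))) =
            Prod.snd := rfl
        rw [this]
        refine pv_nodup_map_snd p.1 _ ?_ (PySem.Set.nodup_ofList _)
        intro q hq
        simpa using (List.mem_filter.1 ((PySem.Set.mem_ofList _ q).1 hq)).2
      simpa [PySem.Dict.keys_mk] using this
    rw [show pvStepA d p = (d.setdefault p.1 PySem.Dict.empty).insert p.1
      (((d.setdefault p.1 PySem.Dict.empty).getD p.1 PySem.Dict.empty).insert p.2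
       (((d.setdefault p.1 PySem.Dict.empty).getD p.1 PySem.Dict.empty).getD p.2 0 + 1))
      from rfl]
    rw [PySem.Dict.setdefault_of_contains d _ hc, hrow]
    have hinner : (PySem.Dict.mk (pvRow ps p.1)).insert p.2
        ((PySem.Dict.mk (pvRow ps p.1)).getD p.2 0 + 1) =
        PySem.Dict.mk (pvRow (ps ++ [p]) p.1) := by
      by_cases hpb : p ∈ ps
      · have hpmem_row : (p.2, (ps.count p : Int)) ∈ pvRow ps p.1 := by
          unfold pvRow
          exact List.mem_map_of_mem
            ((PySem.Set.mem_ofList _ _).2 (List.mem_filter.2 ⟨hpb, by simp⟩))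
        have hbrow : (PySem.Dict.mk (pvRow ps p.1)).getD p.2 0 = (ps.count p : Int) :=
          PySem.Dict.getD_of_mem_items _ hpmem_row hrnodup _
        have hbc : (PySem.Dict.mk (pvRow ps p.1)).contains p.2 = true := by
          rw [PySem.Dict.contains_eq_decide_mem_keys]
          refine decide_eq_true ?_
          rw [PySem.Dict.keys_mk]
          exact List.mem_map_of_mem (f := Prod.fst) hpmem_row
        apply PySem.Dict.ext
        rw [PySem.Dict.items_insert_of_contains _ _ hbc, hbrow]
        rw [show (PySem.Dict.mk (pvRow (ps ++ [p]) p.1)).items = pvRow (ps ++ [p]) p.1 from rfl,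
          pvRow_dup ps p hpb]
      · have hbc : (PySem.Dict.mk (pvRow ps p.1)).contains p.2 = false := by
          rw [PySem.Dict.contains_eq_decide_mem_keys]
          refine decide_eq_false ?_
          rw [PySem.Dict.keys_mk]
          intro hb
          obtain ⟨e, he, he2⟩ := List.mem_map.1 hb
          obtain ⟨q, hq, rfl⟩ := List.mem_map.1 ((by unfold pvRow at he; exact he) :
            e ∈ (PySem.Set.ofList (ps.filter (fun q => q.1 == p.1))).map
              (fun q => (q.2, (ps.count q : Int))))
          have hq' := (PySem.Set.mem_ofList _ q).1 hq
          have hq1 : q.1 = p.1 := by simpa using (List.mem_filter.1 hq').2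
          have : q = p := Prod.ext hq1 (by simpa using he2)
          exact hpb (this ▸ (List.mem_filter.1 hq').1)
        have hbrow : (PySem.Dict.mk (pvRow ps p.1)).getD p.2 0 = 0 :=
          PySem.Dict.getD_of_not_contains _ _ hbc
        have hcnt : ps.count p = 0 := List.count_eq_zero.2 hpb
        apply PySem.Dict.ext
        rw [PySem.Dict.items_insert_of_not_contains _ _ hbc, hbrow]
        rw [show (PySem.Dict.mk (pvRow (ps ++ [p]) p.1)).items = pvRow (ps ++ [p]) p.1 from rfl,
          pvRow_fresh ps p hpb, hcnt]
        norm_num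
    rw [hinner, PySem.Dict.items_insert_of_contains d _ hc, ih]
    unfold pvBG
    rw [pvBG_map_fst_append, if_pos hmem, List.map_map]
    refine List.map_congr_left ?_
    intro a' ha'
    by_cases ha : a' = p.1
    · subst ha; simp
    · have : p.1 ≠ a' := fun e => ha e.symm
      simp only [Function.comp]
      rw [if_neg (by simpa using ha), pvRow_ne ps p a' this]
  · -- outer key fresh
    have hc : d.contains p.1 = false := by rw [hcont]; exact decide_eq_false hmem
    have hpb : p ∉ ps := fun h => hmem (List.mem_map_of_mem (f := Prod.fst) h)
    have hfilter : ps.filter (fun q => q.1 == p.1) = [] := by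
      rw [List.filter_eq_nil_iff]
      intro q hq
      simp only [beq_iff_eq]
      exact fun e => hmem (e ▸ List.mem_map_of_mem (f := Prod.fst) hq)
    have hrow0 : pvRow ps p.1 = [] := by
      unfold pvRow; rw [hfilter]; rfl
    have hcnt : ps.count p = 0 := List.count_eq_zero.2 hpb
    have hrow1 : pvRow (ps ++ [p]) p.1 = [(p.2, 1)] := by
      rw [pvRow_fresh ps p hpb, hrow0, hcnt]
      norm_num
    rw [show pvStepA d p = (d.setdefault p.1 PySem.Dict.empty).insert p.1
      (((d.setdefault p.1 PySem.Dict.empty).getD p.1 PySem.Dict.empty).insert p.2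
       (((d.setdefault p.1 PySem.Dict.empty).getD p.1 PySem.Dict.empty).getD p.2 0 + 1))
      from rfl]
    rw [PySem.Dict.setdefault_of_not_contains d _ hc, PySem.Dict.getD_insert_self,
      PySem.Dict.insert_insert_self]
    have hempty : (PySem.Dict.empty : PySem.Dict String Int).insert p.2
        ((PySem.Dict.empty : PySem.Dict String Int).getD p.2 0 + 1) =
        PySem.Dict.mk (pvRow (ps ++ [p]) p.1) := by
      apply PySem.Dict.ext
      rw [PySem.Dict.items_insert_of_not_contains _ _ (PySem.Dict.contains_empty _),
        PySem.Dict.getD_empty]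
      rw [show (PySem.Dict.mk (pvRow (ps ++ [p]) p.1)).items = pvRow (ps ++ [p]) p.1 from rfl,
        hrow1]
      norm_num
      rfl
    rw [hempty, PySem.Dict.items_insert_of_not_contains d _ hc, ih]
    unfold pvBG
    rw [pvBG_map_fst_append, if_neg hmem, List.map_append, List.map_singleton]
    congr 1
    refine List.map_congr_left ?_
    intro a' ha'
    have ha : p.1 ≠ a' := by
      intro e
      exact hmem (e ▸ (PySem.Set.mem_ofList _ _).1 ha')
    rw [pvRow_ne ps p a' ha]

theorem pvA_char (ps : List (String × String)) :
    (ps.foldl pvStepA PySem.Dict.empty).items = pvBG ps := by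
  induction ps using List.reverseRecOn with
  | nil => rfl
  | append_singleton ps p ih =>
    rw [List.foldl_append, List.foldl_cons, List.foldl_nil]
    exact pvA_step ps p _ ih

def pvStepV (d : PySem.Dict String (Option Unit)) (ab : String × String) :
    PySem.Dict String (Option Unit) :=
  (d.insert ab.1 none).insert ab.2 none

-- B-side: a first-occurrence fold with a fixed per-key value yields dedup.map
theorem pvB_row_fold (l : List String) (f : String → Int) :
    ((l.foldl
        (fun (r : PySem.Dict String Int) b =>
          if r.contains b then r else r.insert b (f b))
        PySem.Dict.empty)).items =
      (PySem.Set.ofList l).map (fun b => (b, f b)) := by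
  induction l using List.reverseRecOn with
  | nil => rfl
  | append_singleton l b ih =>
    rw [List.foldl_append, List.foldl_cons, List.foldl_nil]
    set d := l.foldl
        (fun (r : PySem.Dict String Int) b =>
          if r.contains b then r else r.insert b (f b)) PySem.Dict.empty with hd
    have hkeys : d.keys = PySem.Set.ofList l := by
      show d.items.map Prod.fst = _
      rw [ih, List.map_map]; exact List.map_id _
    have hcont : d.contains b = decide (b ∈ l) := by
      rw [PySem.Dict.contains_eq_decide_mem_keys, hkeys]
      simp [PySem.Set.mem_ofList]
    by_cases hmem : b ∈ l
    · rw [if_pos (by rw [hcont]; exact decide_eq_true hmem), ih,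
        pv_dedup_append, if_pos hmem]
    · have hc : d.contains b = false := by rw [hcont]; exact decide_eq_false hmem
      rw [if_neg (by simp [hc]), PySem.Dict.items_insert_of_not_contains d _ hc, ih,
        pv_dedup_append, if_neg hmem, List.map_append, List.map_singleton]

-- B-side: the grouping pass characterisation
def pvSucc (ps : List (String × String)) (a : String) : List String :=
  (ps.filter (fun x => x.1 == a)).map (fun x => x.2)

theorem pvSucc_append (ps : List (String × String)) (p : String × String) (a : String) :
    pvSucc (ps ++ [p]) a = pvSucc ps a ++ (if p.1 = a then [p.2] else []) := by
  unfold pvSucc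
  rw [List.filter_append, List.map_append]
  by_cases h : p.1 = a <;> simp [h]

def pvStepG (g : PySem.Dict String (List String)) (p : String × String) :
    PySem.Dict String (List String) :=
  let g1 := g.setdefault p.1 []
  g1.insert p.1 (g1.getD p.1 [] ++ [p.2])

def pvG (ps : List (String × String)) : List (String × List String) :=
  (PySem.Set.ofList (ps.map Prod.fst)).map (fun a => (a, pvSucc ps a))

theorem pvG_step (ps : List (String × String)) (p : String × String)
    (d : PySem.Dict String (List String)) (ih : d.items = pvG ps) :
    (pvStepG d p).items = pvG (ps ++ [p]) := by
  have hkeys : d.keys = PySem.Set.ofList (ps.map Prod.fst) := by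
    show d.items.map Prod.fst = _
    rw [ih]; unfold pvG; rw [List.map_map]; exact List.map_id _
  have hnodk : d.keys.Nodup := by rw [hkeys]; exact PySem.Set.nodup_ofList _
  have hcont : d.contains p.1 = decide (p.1 ∈ ps.map Prod.fst) := by
    rw [PySem.Dict.contains_eq_decide_mem_keys, hkeys]
    simp [PySem.Set.mem_ofList]
  by_cases hmem : p.1 ∈ ps.map Prod.fst
  · have hc : d.contains p.1 = true := by rw [hcont]; exact decide_eq_true hmem
    have hrow : d.getD p.1 [] = pvSucc ps p.1 := by
      refine PySem.Dict.getD_of_mem_items d ?_ hnodk _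
      rw [ih]; unfold pvG
      exact List.mem_map_of_mem ((PySem.Set.mem_ofList _ _).2 hmem)
    rw [show pvStepG d p = (d.setdefault p.1 []).insert p.1
      ((d.setdefault p.1 []).getD p.1 [] ++ [p.2]) from rfl]
    rw [PySem.Dict.setdefault_of_contains d _ hc, hrow,
      PySem.Dict.items_insert_of_contains d _ hc, ih]
    unfold pvG
    rw [pvBG_map_fst_append, if_pos hmem, List.map_map]
    refine List.map_congr_left ?_
    intro a' ha'
    simp only [Function.comp]
    by_cases ha : a' = p.1
    · subst ha
      rw [if_pos (by simp), pvSucc_append, if_pos rfl]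
    · rw [if_neg (by simpa using ha), pvSucc_append, if_neg (fun e => ha e.symm),
        List.append_nil]
  · have hc : d.contains p.1 = false := by rw [hcont]; exact decide_eq_false hmem
    rw [show pvStepG d p = (d.setdefault p.1 []).insert p.1
      ((d.setdefault p.1 []).getD p.1 [] ++ [p.2]) from rfl]
    rw [PySem.Dict.setdefault_of_not_contains d _ hc, PySem.Dict.getD_insert_self,
      PySem.Dict.insert_insert_self, PySem.Dict.items_insert_of_not_contains d _ hc, ih]
    unfold pvG
    rw [pvBG_map_fst_append, if_neg hmem, List.map_append, List.map_singleton]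
    have hsucc1 : pvSucc (ps ++ [p]) p.1 = [p.2] := by
      rw [pvSucc_append, if_pos rfl]
      have : pvSucc ps p.1 = [] := by
        unfold pvSucc
        rw [List.filter_eq_nil_iff.2, List.map_nil]
        intro q hq
        simp only [beq_iff_eq]
        exact fun e => hmem (e ▸ List.mem_map_of_mem (f := Prod.fst) hq)
      rw [this]; rfl
    rw [hsucc1]
    congr 1
    refine List.map_congr_left ?_
    intro a' ha'
    rw [pvSucc_append, if_neg, List.append_nil]
    exact fun e => hmem (e ▸ (PySem.Set.mem_ofList _ _).1 ha')

theorem pvG_char (ps : List (String × String)) :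
    (ps.foldl pvStepG PySem.Dict.empty).items = pvG ps := by
  induction ps using List.reverseRecOn with
  | nil => rfl
  | append_singleton ps p ih =>
    rw [List.foldl_append, List.foldl_cons, List.foldl_nil]
    exact pvG_step ps p _ ih

-- B-side: inserting distinct keys into an empty dict yields the map of the entry list
theorem pvB_outer_fold (L : List (String × List String))
    (h : String × List String → PySem.Dict String Int) (hnd : (L.map Prod.fst).Nodup) :
    ((L.foldl (fun (bg : PySem.Dict String (PySem.Dict String Int)) x => bg.insert x.1 (h x))
        PySem.Dict.empty)).items = L.map (fun x => (x.1, h x)) := by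
  induction L using List.reverseRecOn with
  | nil => rfl
  | append_singleton L x ih =>
    have hnd' : (L.map Prod.fst).Nodup := by
      simpa [List.map_append] using (List.nodup_append.1 (by simpa [List.map_append] using hnd)).1
    have hx : x.1 ∉ L.map Prod.fst := by
      have hnd2 : (L.map Prod.fst ++ [x.1]).Nodup := by simpa [List.map_append] using hnd
      intro hm
      rcases List.nodup_append.1 hnd2 with ⟨-, -, hdisj⟩
      simpa using hdisj _ hm
    rw [List.foldl_append, List.foldl_cons, List.foldl_nil]
    set d := L.foldl
        (fun (bg : PySem.Dict String (PySem.Dict String Int)) x => bg.insert x.1 (h x))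
        PySem.Dict.empty with hd
    have hkeys : d.keys = L.map Prod.fst := by
      show d.items.map Prod.fst = _
      rw [ih hnd', List.map_map]; rfl
    have hc : d.contains x.1 = false := by
      rw [PySem.Dict.contains_eq_decide_mem_keys, hkeys]
      exact decide_eq_false hx
    rw [PySem.Dict.items_insert_of_not_contains d _ hc, ih hnd', List.map_append,
      List.map_singleton]

-- B's row for head a equals A's pvRow ps a
theorem pvB_row_eq (ps : List (String × String)) (a : String) :
    (PySem.Set.ofList ((ps.filter (fun x => x.1 == a)).map (fun x => x.2))).map
      (fun b => (b, (((ps.filter (fun x => x.1 == a)).map (fun x => x.2)).count b : Int))) =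
      pvRow ps a := by
  set F := ps.filter (fun x => x.1 == a) with hF
  have hall : ∀ q ∈ F, q.1 = a := by
    intro q hq
    simpa using (List.mem_filter.1 hq).2
  have hsnd : (fun x : String × String => x.2) = Prod.snd := rfl
  have hnd : ((PySem.Set.ofList F).map Prod.snd).Nodup := by
    refine pv_nodup_map_snd a _ ?_ (PySem.Set.nodup_ofList _)
    intro q hq
    exact hall q ((PySem.Set.mem_ofList _ q).1 hq)
  have hsets : PySem.Set.ofList (F.map (fun x => x.2)) = (PySem.Set.ofList F).map Prod.snd := by
    rw [hsnd, ← pv_dedup_map_dedup Prod.snd F, pv_ofList_self _ hnd]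
  rw [hsets, List.map_map]
  unfold pvRow
  rw [← hF]
  refine List.map_congr_left ?_
  intro p hp
  have hpF : p ∈ F := (PySem.Set.mem_ofList _ p).1 hp
  have hp1 : p.1 = a := hall p hpF
  have hcount : (F.map (fun x => x.2)).count p.2 = ps.count p := by
    rw [hsnd]
    rw [List.count_eq_countP, List.countP_map]
    have h1 : F.countP ((fun x => x == p.2) ∘ Prod.snd) = F.countP (· == p) := by
      refine List.countP_congr ?_
      intro q hq
      simp only [Function.comp, beq_iff_eq]
      constructor
      · intro h2
        have : q = p := Prod.ext (by rw [hall q hq, hp1]) h2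
        simp [this]
      · intro h2; rw [h2]
    rw [h1, ← List.count_eq_countP, hF, List.count_filter]
    simp [hp1]
  simp only [Function.comp]
  rw [hcount]

-- ===== MAIN EQUALITY =====
theorem pv_main (tokens : List String) :
    build_bigrams tokens = build_bigrams_alt tokens := by
  set ps := tokens.zip (PySem.List.slice tokens (some 1) none) with hps
  have hsplit :
      ps.foldl
        (fun (st : PySem.Dict String (PySem.Dict String Int) × PySem.Dict String (Option Unit)) ab =>
          (pvStepA st.1 ab, pvStepV st.2 ab))
        (PySem.Dict.empty, PySem.Dict.empty) =
      (ps.foldl pvStepA PySem.Dict.empty, ps.foldl pvStepV PySem.Dict.empty) :=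
    PySem.List.foldl_prod_mk _ _ _ _ _
  show
    ((ps.foldl
        (fun (st : PySem.Dict String (PySem.Dict String Int) × PySem.Dict String (Option Unit)) ab =>
          (pvStepA st.1 ab, pvStepV st.2 ab))
        (PySem.Dict.empty, PySem.Dict.empty)).1.items.map (fun kr => (kr.1, kr.2.items)),
     (ps.foldl
        (fun (st : PySem.Dict String (PySem.Dict String Int) × PySem.Dict String (Option Unit)) ab =>
          (pvStepA st.1 ab, pvStepV st.2 ab))
        (PySem.Dict.empty, PySem.Dict.empty)).2.keys) =
    (((ps.foldl pvStepG PySem.Dict.empty).items.foldl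
        (fun (bg : PySem.Dict String (PySem.Dict String Int)) asucc =>
          bg.insert asucc.1
            (asucc.2.foldl
              (fun (r : PySem.Dict String Int) b =>
                if r.contains b then r else r.insert b ((asucc.2.count b : Int)))
              PySem.Dict.empty))
        PySem.Dict.empty).items.map (fun kr => (kr.1, kr.2.items)),
     ps.foldl (fun (vs : PySem.Set String) p => PySem.Set.add (PySem.Set.add vs p.1) p.2)
       PySem.Set.empty)
  rw [hsplit]
  refine Prod.ext ?_ ?_
  · -- bigram dicts agree
    show ((ps.foldl pvStepA PySem.Dict.empty).items).map (fun kr => (kr.1, kr.2.items)) = _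
    rw [pvA_char, pvG_char]
    have hndG : ((pvG ps).map Prod.fst).Nodup := by
      unfold pvG
      rw [List.map_map]
      have : (Prod.fst ∘ fun a : String => (a, pvSucc ps a)) = id := rfl
      rw [this, List.map_id]
      exact PySem.Set.nodup_ofList _
    rw [pvB_outer_fold _ _ hndG]
    dsimp only
    unfold pvG pvBG
    rw [List.map_map, List.map_map, List.map_map]
    refine List.map_congr_left ?_
    intro a _
    simp only [Function.comp]
    congr 1
    rw [show pvSucc ps a = (ps.filter (fun x => x.1 == a)).map (fun x => x.2) from rfl]
    rw [pvB_row_fold, pvB_row_eq ps a]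
  · -- vocab lists agree
    show ((ps.foldl pvStepV PySem.Dict.empty)).keys = _
    have h1 : ps.foldl pvStepV PySem.Dict.empty =
        (ps.flatMap (fun p => [p.1, p.2])).foldl
          (fun d x => d.insert x ((fun _ _ => (none : Option Unit)) d x)) PySem.Dict.empty := by
      rw [List.foldl_flatMap]
      rfl
    have h2 : ps.foldl (fun (vs : PySem.Set String) p =>
        PySem.Set.add (PySem.Set.add vs p.1) p.2) PySem.Set.empty =
        (ps.flatMap (fun p => [p.1, p.2])).foldl PySem.Set.add PySem.Set.empty := by
      rw [List.foldl_flatMap]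
      rfl
    rw [h1, h2, PySem.Dict.keys_foldl_insert]
    rfl

-- ===== VERDICT (by name: the statement is the Claim_ definition above) =====
theorem build_bigrams_spec : Claim_equal_build_bigrams := by
  intro tokens _
  show build_bigrams tokens = build_bigrams_alt tokens
  exact pv_main tokens
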